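/- GENERATED by mk_final_copies.py from the proof of the farm's unit `start_decoder.C14a` (farm:start_decoder.C14a.1: Lemmas.lean) as the
   re-elaboration sweep compiled it — do not edit. -/
import Asan.CheckWalk
import Vorbis.Spec.Units.start_decoder_C14a
import Vorbis.Spec.StartDecoderCarry

/-!
  The unit `start_decoder.C14a` (0x1150b9 … 0x1150c5: `lea esi,[rbx*4] ; mov rdi,[rsp+18H] ; call setup_malloc`), written by H-32 on the pattern of
  the C12 head start; the failure arm by `Cur.alloc_fail_any` (Vorbis/Spec/StartDecoderCarry.lean).
      c14a_obj_where   where `*f` is       c14a_malloc_pre   `setup_malloc`'s precondition at 0x1150c5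
      c14a_slot        `q[R+28H]` (mults) over the push and the allocator's footprint (both arms)
      c14a_build       PURE: `In14A` from `InC14` and what `Cur.alloc_call` / `Cur.alloc_fail_any` return (both arms)
      c14a_walk        the walk
-/

open X86 X86.User Asan Vorbis Vorbis.Spec Vorbis.Spec.StartDecoder

set_option maxRecDepth 100000
set_option maxHeartbeats 4000000

namespace Vorbis.Spec.start_decoder_C14a

/-- **Where `*f` is** (a stack object of stb_vorbis_open_memory, or an object of `A.2`): in the data space, and off the part of the
stack below the steady stack pointer `R` — what reading a field of `*f` through the function's own pushes needs. -/
theorem c14a_obj_where {g : Ghost} {i : Nat} {A2 A3 Ai : Arena} {A : Arena × List Obj} {v : State} (h : Cur g i A2 A3 Ai A v)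
    (hsh : ShadowInv A.2 g.frames' g.R v.mem) (hoff : ∀ o, o ∈ A.2 → L.textHi ≤ o.base) :
    0x119d40 ≤ g.f ∧ g.f + 1808 ≤ 0xC00000 ∧ (g.R ≤ g.f ∨ g.f + 1808 ≤ 0x700000 ∨ 0x800000 ≤ g.f) := by
  have hl : LiveIn A.2 g.frames' g.f Off.sizeof.stb_vorbis := by
    apply h.hand.obj.mono
    intro o ho
    unfold Ghost.frames'
    rw [stackObjs_cons]
    rcases List.mem_append.mp ho with hs | ho'
    · exact List.mem_append_left _ (List.mem_append_right _ hs)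
    · exact List.mem_append_right _ ho'
  have hw := hl.where_ hsh hoff (by simp only [voff]; omega)
  simp only [voff] at hw
  exact hw

/-- **`setup_malloc`'s precondition at 0x1150c5**: the state `s` at the callee's entry has the memory of the cut point but for the pushed
return address below `R` (`hmem`), `rsp = R − 8`, `rdi = f`. -/
theorem c14a_malloc_pre {u₀ : State} {g : Ghost} {i : Nat} {A2 A3 Ai : Arena} {A : Arena × List Obj} {pc : Word} {v s : State}
    (hfr : Frame u₀ g pc A v) (hcur : Cur g i A2 A3 Ai A v) (hun : ShadowUntouched v.mem s.mem)
    (hmem : Mem.EqOn (g.f + 112) (g.f + 136) v.mem s.mem) (hrsp : (s.reg .rsp).toNat + 8 = g.R)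
    (hrdi : (s.reg .rdi).toNat = g.f) : (setup_malloc.spec A.2 g.frames' A.1).pre s := by
  have hob := hcur.sd.bits.OB1
  obtain ⟨hf1, hf2, _⟩ := c14a_obj_where hcur hfr.shadow hfr.offText
  refine ⟨⟨?_, hfr.offText⟩, ?_, ?_, hcur.hand.arenaText⟩
  · rw [hrsp]
    exact hfr.shadow.untouched hun
  · rw [hrdi]
    exact hcur.sd.env.live _ hob
  · rw [hrdi]
    apply hcur.sd.arena.frame (by simp only [voff]; omega)
    simp only [voff]
    exact hmem

/-- **The slot `q[R+28H]` (mults) over the call**: neither the pushed return address, nor the allocator's stack, nor its two fields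
of `*f`, nor any shadow byte is in the function's own frame. -/
theorem c14a_slot {g : Ghost} {A : Arena × List Obj} {m ms mr : Mem} {a : Word} {x sp n p : Nat} (hp : Pos g A)
    (hmem : ms = m.writeLE a 8 x) (ha : a.toNat + 8 = g.R) (hsp : sp + 8 = g.R)
    (hs : Mem.SameExcept [⟨sp - 80, sp⟩, ⟨g.f + 8, g.f + 12⟩, ⟨g.f + 128, g.f + 132⟩, shadowSpan p (p + n)] ms mr) :
    mr.u64 (g.R + 0x28) = m.u64 (g.R + 0x28) := by
  have p1 := hp.r_eq
  have p2 := hp.ra_hi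
  have p3 := hp.ra_lo
  have p4 := hp.f_stack
  have hpush : Mem.SameExcept [⟨g.R - 8, g.R⟩] m ms := by
    rw [hmem]
    apply Mem.SameExcept.writeLE
    · omega
    · refine ⟨_, List.mem_cons_self, ?_, ?_⟩
      · simp only []
        omega
      · simp only []
        omega
  have e1 : Mem.EqOn (g.R + 0x28) (g.R + 0x30) m ms := by
    apply hpush.eqOn
    intro w hw
    rw [List.mem_singleton.mp hw]
    simp only []
    omega
  have e2 : Mem.EqOn (g.R + 0x28) (g.R + 0x30) ms mr := by
    apply hs.eqOn
    intro w hw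
    simp only [List.mem_cons, List.mem_nil_iff, or_false] at hw
    rcases hw with rfl | rfl | rfl | rfl
    · simp only []
      omega
    · simp only []
      omega
    · simp only []
      omega
    · unfold shadowSpan
      simp only []
      omega
  exact (Mem.EqOn.trans e1 e2).u64 (g.R + 0x28) (Nat.le_refl _) (by omega) (by omega)

/-- **`In14A` from the return of the allocator, pure part** (both arms): `Frame` and `Cur` at the returned state `w` for the ghost `A'`
(the grown one, or `A` itself), `cb(i)` unmoved, every setup block of `A` kept, the slot of `mults`, and the allocator's result. -/
theorem c14a_build {u₀ : State} {g : Ghost} {i : Nat} {A2 A3 Ai : Arena} {A A' : Arena × List Obj} {mults : Nat} {v w : State}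
    (h : InC14 u₀ g i A2 A3 Ai A mults v) (hF : Frame u₀ g L.start_decoder.cut177 A' w) (hC : Cur g i A2 A3 Ai A' w)
    (hcb : g.cb w.mem i = g.cb v.mem i) (hkept : AllKept A.1.Blk v.mem w.mem) (hext : A.1.Extends A'.1)
    (htemps : A'.1.temps = A.1.temps) (hB : A'.1.B = A.1.B)
    (hslot : w.mem.u64 (g.R + 0x28) = v.mem.u64 (g.R + 0x28))
    (halloc : w.reg .rax = 0 ∨ Since A.1 A'.1 ⟨(w.reg .rax).toNat, 4 * Codebook.lookup_values v.mem (g.cb v.mem i)⟩) :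
    In14A u₀ g i A2 A3 Ai A.1 A' mults w := by
  have hcbOK := h.cur.ages.cbOK
  have hkI : AllKept Ai.Blk v.mem w.mem := fun B hB => hkept B (hB.mono h.cur.ages.exti)
  have hstruct : (Codebook.block (g.cb v.mem i)).Kept v.mem w.mem := hcbOK.cb_kept (hkI _ hcbOK.F2) i h.cur.lt
  have hsf := Codebook.SameFields.of_kept hstruct
  have hsv : 1 ≤ Codebook.sorted_entries v.mem (g.cb v.mem i) →
      (Codebook.svBlock v.mem (g.cb v.mem i)).Kept v.mem w.mem := fun hse => hkept _ (h.k.k4.sv hse).1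
  have hk : K15 (Since Ai A.1) w.mem (g.cb v.mem i) := h.k.frame hstruct hsv
  exact
    { frame := hF
      cur := hC
      extm := h.cur.ages.exti
      extm' := hext
      k := by rw [hcb]; exact hk
      type2 := by rw [hcb, hsf.lookup_type]; exact h.type2
      lv_eq := by rw [hcb, hsf.lookup_values, hsf.entries, hsf.dimensions]; exact h.lv_eq
      lv_le := by rw [hcb, hsf.lookup_values]; exact h.lv_le
      mults :=
        { slot := by rw [hslot]; exact h.mults.slot
          temps := by
            rw [hcb, hsf.lookup_values]
            have ht := h.mults.temps
            unfold TempsAre at ht ⊢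
            rw [htemps, hB]
            exact ht
          lv_pos := by rw [hcb, hsf.lookup_values]; exact h.mults.lv_pos
          lv_lt := by rw [hcb, hsf.lookup_values]; exact h.mults.lv_lt }
      mu0 := by rw [hcb, hsf.multiplicands]; exact h.mu0
      alloc := by rw [hcb, hsf.lookup_values]; exact halloc }

/-- Segment C14a: the walk over `call setup_malloc`, both arms. -/
theorem c14a_walk
    (Lay : Layout) (hLay : Lay.hi = 0x1000000) (μ : Microarch) (hμ : UserX.MicroOK μ) (u₀ : State)
    (hcode : HasCodeNat Lay u₀ Vorbis.L.start_decoder.entry Vorbis.Code.code_start_decoder.nat Vorbis.L.start_decoder.size)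
    (hmalloc : ∀ (others : List Obj) (frames : List (Nat × FrameLayout)) (A : Arena), Calls Lay μ Vorbis.WayInv (Vorbis.conv u₀) Vorbis.L.setup_malloc.entry (Vorbis.Spec.setup_malloc.spec others frames A)) :
    SegC14a Lay μ u₀ := by
  intro g i v hat
  obtain ⟨A, mults, A2, A3, Ai, h⟩ := hat
  have he := h.frame.entry
  v_entry he
  have w_rip := h.frame.rip
  have hfr0 := h.frame
  have hcur := h.cur
  have hshad := h.frame.shadow
  have hpos : Pos g A := Pos.of hfr0 hcur
  have p1 := hpos.r_eq
  have p2 := hpos.ra_lo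
  have p3 := hpos.ra_hi
  have hsp : (v.reg .rsp).toNat = g.R := by
    rw [hfr0.rsp]
    exact toNat_addr _ (by omega)
  have c_rbx := h.rbx
  have c_r14 := h.cur.r14
  have w_eq : Mem.EqOn Vorbis.L.textLo Vorbis.L.textHi u₀.mem v.mem := h.frame.code
  have hdf : v.flags .df = false := (show abiInv _ from h.frame.inv).1
  have hmx : v.mxcsr &&& 0x1F80 = 0x1F80 := (show abiInv _ from h.frame.inv).2
  have hsse := Vorbis.sseOK_of_abiInv h.frame.inv
  have hRA : g.RA = (g.e.reg .rsp).toNat := rfl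
  have hslotf : v.mem.readLE (v.reg .rsp + 24) 8 = g.f := by
    have := h.cur.slot_f
    rw [hfr0.rsp]
    simp only [vfield]
    exact this
  obtain ⟨hf1, hf2, hf3⟩ := c14a_obj_where hcur hshad hfr0.offText
  have hm := hmalloc A.2 g.frames' A.1
  u_walk hcode [hμ.vendor] until [Vorbis.L.start_decoder.cut177] span [Vorbis.L.textLo, Vorbis.L.textHi] side (v_side)
  case call_inv => v_inv
  case pre_1150c5 =>
    have hun : ShadowUntouched v.mem s_1150c5.mem := by v_untouched
    apply c14a_malloc_pre hfr0 hcur hun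
    · rw [w_mem]
      apply Mem.EqOn.writeLE
      · u_omega
      · u_omega
    · rw [w_rsp]
      u_omega
    · rw [w_rdi]
      exact toNat_addr _ (by omega)
  -- 0x1150ca: setup_malloc(f, 4·LV) returned
  have hlv := h.lv_le
  have ersi : (s_1150c5.reg .rsi).toNat % 2 ^ 32 = 4 * Codebook.lookup_values v.mem (g.cb v.mem i) := by
    rw [w_rsi_1150c5, Vorbis.toNat_ofBV32, BitVec.toNat_setWidth, UInt64.toNat_toBitVec, UInt64.toNat_mul,
      toNat_addr _ (by omega)]
    have e4 : (4 : Word).toNat = 4 := rfl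
    rw [e4]
    omega
  simp only [X86.User.Spec.footprint, vspec] at w_same
  have e_sp : (s_1150c5.reg .rsp).toNat + 8 = g.R := by
    rw [w_rsp_1150c5]
    u_omega
  have e_a : (v.reg .rsp - 8).toNat + 8 = g.R := by u_omega
  have e_rdi : (s_1150c5.reg .rdi).toNat = g.f := by
    rw [w_rdi_1150c5]
    exact toNat_addr _ (by omega)
  have hslot : s_1150c5r.mem.u64 (g.R + 0x28) = v.mem.u64 (g.R + 0x28) := by
    have hs' := w_same
    rw [e_rdi] at hs'
    exact c14a_slot hpos w_mem_1150c5 e_a e_sp hs'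
  by_cases hfit : A.1.Fits ((s_1150c5.reg .rsi).toNat % 2 ^ 32)
  · -- the request fits: the ghost arena grows by the block of `multiplicands`
    obtain ⟨r1, r2, r3, r4, r5⟩ := Cur.alloc_call hfr0 hcur w_mem_1150c5 e_a e_sp e_rdi w_same w_post hfit w_rip w_rsp
      (Vorbis.conv_code_eqOn w_code) w_inv (w_kept.get .r14 rfl)
    apply ReachVia.done
    refine ⟨_, mults, A2, A3, Ai, A.1, c14a_build h r1 r2 r3 r4 (A.1.extends_pushSetup _) rfl rfl hslot (Or.inr ?_)⟩
    have hsince := hcur.sd.arena.since_pushSetup ((s_1150c5.reg .rsi).toNat % 2 ^ 32)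
    rw [r5, ← ersi, Nat.add_assoc]
    exact hsince
  · -- the request does not fit: rax = 0, the same ghost (`Cur.alloc_fail_any`: the failure clause of setup_malloc.spec carries the footprint of the failed call)
    obtain ⟨r1, r2, r3, r4, r5⟩ := Cur.alloc_fail_any hfr0 hcur w_mem_1150c5 e_a e_sp e_rdi w_same w_post hfit
      w_rip w_rsp (Vorbis.conv_code_eqOn w_code) w_inv (w_kept.get .r14 rfl)
    apply ReachVia.done
    exact ⟨A, mults, A2, A3, Ai, A.1, c14a_build h r1 r2 r3 r4 (Arena.Extends.refl _) rfl rfl hslot (Or.inl r5)⟩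

end Vorbis.Spec.start_decoder_C14a
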